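-- pv_equiv track=rewrite | github.com/punnawitskv/MYCODE | .other/damm_stupid_chat_couldn't_give_me_an_answer_so_i'll_do_it_myself/pattern_name/pattern_name.py | abbreviated_with_name
-- ===== SOURCE A (Python) =====
-- def abbreviated_with_name(name_input, abbreviated_input):
--     count = 0
--     new_name = ''
--     while count < len(name_input):
--         if count < len(abbreviated_input):
--             new_name += abbreviated_input[count]
--         else:
--             new_name += name_input[count]
--         count += 1
--     return new_name
-- ===== SOURCE B (Python) =====
-- def abbreviated_with_name(name_input, abbreviated_input):
--     n = len(name_input)
--     return abbreviated_input[:n] + name_input[len(abbreviated_input):n]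
-- ===== Notes on version B (the rewrite author's own statement) =====
-- stated objective: faster
-- what changed: Replaced the character-by-character index loop that accumulates a string with a single closed-form concatenation of two slices: the abbreviation prefix clipped to the name length plus the name's tail beyond the abbreviation.
import Mathlib
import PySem

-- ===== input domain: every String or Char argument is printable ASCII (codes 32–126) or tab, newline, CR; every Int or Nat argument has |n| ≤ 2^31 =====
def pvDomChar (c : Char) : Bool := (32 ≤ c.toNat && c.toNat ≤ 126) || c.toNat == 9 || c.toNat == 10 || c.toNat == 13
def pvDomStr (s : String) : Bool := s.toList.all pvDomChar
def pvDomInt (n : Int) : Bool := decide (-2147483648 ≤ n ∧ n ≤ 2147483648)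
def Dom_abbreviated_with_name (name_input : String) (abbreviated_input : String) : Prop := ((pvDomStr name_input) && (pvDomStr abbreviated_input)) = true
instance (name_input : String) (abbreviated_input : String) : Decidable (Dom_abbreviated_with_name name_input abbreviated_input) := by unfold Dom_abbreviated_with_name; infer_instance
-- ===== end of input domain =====

-- B replaces A's per-character while loop with two slices joined by one concatenation (simpler; same return value).

-- ===== PORT A =====
-- A's while loop: count advances while count < len(name); the in-range indexings
-- name_input[count] / abbreviated_input[count] are ported as List.getD (exact: count is in range).
def awnLoop (name abbr : List Char) (count : Nat) (acc : List Char) : List Char :=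
  if count < name.length then
    awnLoop name abbr (count + 1)
      (acc ++ [if count < abbr.length then abbr.getD count ' ' else name.getD count ' '])
  else acc
termination_by name.length - count

def abbreviated_with_name (name_input : String) (abbreviated_input : String) : String :=
  String.ofList (awnLoop name_input.toList abbreviated_input.toList 0 [])

-- ===== PORT B =====
-- Source B: abbreviated_input[:n] + name_input[len(abbreviated_input):n] with n = len(name_input)
def abbreviated_with_name_alt (name_input : String) (abbreviated_input : String) : String :=
  String.ofList (PySem.List.slice abbreviated_input.toList none (some (name_input.toList.length : Int)) ++
             PySem.List.slice name_input.toList (some (abbreviated_input.toList.length : Int)) (some (name_input.toList.length : Int)))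

-- ===== PRECONDITION & SPEC =====
def Spec_abbreviated_with_name (name_input : String) (abbreviated_input : String) (out : String) : Prop := out = abbreviated_with_name_alt name_input abbreviated_input
instance (name_input : String) (abbreviated_input : String) (out : String) : Decidable (Spec_abbreviated_with_name name_input abbreviated_input out) := by unfold Spec_abbreviated_with_name; infer_instance

-- ===== CLAIM (what is proved, stated in full; the proofs are below) =====
def Claim_equal_abbreviated_with_name : Prop := ∀ (name_input : String) (abbreviated_input : String), Dom_abbreviated_with_name name_input abbreviated_input → Spec_abbreviated_with_name name_input abbreviated_input (abbreviated_with_name name_input abbreviated_input)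

-- ===== LEMMAS AND PROOFS =====

-- the character A's loop writes at index i
def awnChar (name abbr : List Char) (i : Nat) : Char :=
  if i < abbr.length then abbr.getD i ' ' else name.getD i ' '

theorem awnLoop_eq (name abbr : List Char) :
    ∀ (count : Nat) (acc : List Char),
      awnLoop name abbr count acc
        = acc ++ (List.range' count (name.length - count)).map (awnChar name abbr) := by
  intro count acc
  by_cases h : count < name.length
  · have hd : name.length - count = (name.length - (count + 1)) + 1 := by omega
    rw [awnLoop, if_pos h, awnLoop_eq name abbr (count + 1), hd, List.range'_succ,
        List.map_cons, awnChar]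
    simp
  · rw [awnLoop, if_neg h]
    have : name.length - count = 0 := by omega
    simp [this]
termination_by count => name.length - count
decreasing_by omega

theorem range'_map_eq_slices (name abbr : List Char) :
    (List.range' 0 name.length).map (awnChar name abbr)
      = abbr.take name.length ++ (name.drop abbr.length).take (name.length - abbr.length) := by
  apply List.ext_getElem
  · simp; omega
  · intro i h₁ h₂
    have hn : i < name.length := by simpa using h₁
    simp only [List.getElem_map, List.getElem_range', awnChar, Nat.zero_add, Nat.one_mul]
    by_cases hi : i < abbr.length
    · rw [if_pos hi, List.getElem_append_left (by simp; omega)]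
      simp [List.getD, List.getElem?_eq_getElem hi]
    · rw [if_neg hi]
      have hlen : (abbr.take name.length).length = abbr.length := by simp; omega
      rw [List.getElem_append_right (by rw [hlen]; omega)]
      simp only [List.getElem_take, List.getElem_drop, hlen]
      have he : abbr.length + (i - abbr.length) = i := by omega
      simp [List.getD, he, List.getElem?_eq_getElem hn]

-- ===== VERDICT (by name: the statement is the Claim_ definition above) =====
theorem abbreviated_with_name_spec : Claim_equal_abbreviated_with_name := by
  intro name_input abbreviated_input _
  unfold Spec_abbreviated_with_name abbreviated_with_name abbreviated_with_name_alt
  rw [awnLoop_eq, PySem.List.slice_to_natCast, PySem.List.slice_natCast]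
  simpa using congrArg String.ofList
    (range'_map_eq_slices name_input.toList abbreviated_input.toList)
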